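-- pv_equiv track=rewrite | github.com/uurolcay/astro-yuzu | services/parent_child_interaction_engine.py | _primary_category
-- ===== SOURCE A (Python) =====
-- def _primary_category(parent_pattern, child_pattern):
--     shared = set(parent_pattern["domains"]) & set(child_pattern["domains"])
--     for preferred in ("emotional", "discipline", "communication", "attachment", "karmic"):
--         if preferred in shared:
--             return f"{preferred}_dynamics"
--     for preferred in ("emotional", "discipline", "communication", "attachment", "karmic"):
--         if preferred in set(parent_pattern["domains"]) | set(child_pattern["domains"]):
--             return f"{preferred}_dynamics"
--     return "communication_dynamics"
-- ===== SOURCE B (Python) =====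
-- def _primary_category(parent_pattern, child_pattern):
--     p = set(parent_pattern["domains"])
--     c = set(child_pattern["domains"])
--     prefs = ("emotional", "discipline", "communication", "attachment", "karmic")
--     ranks = [0 if x in p and x in c else 1 if x in p or x in c else 2 for x in prefs]
--     m = min(ranks)
--     if m == 2:
--         return "communication_dynamics"
--     return prefs[ranks.index(m)] + "_dynamics"
-- ===== Notes on version B (the rewrite author's own statement) =====
-- stated objective: alternative
-- what changed: Replaces A's two ordered short-circuit scans (first over the intersection, then over the union) by computing a rank per preference (0 = in both domain sets, 1 = in exactly one side, 2 = in neither), taking the minimum rank and indexing the first preference that attains it.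
import Mathlib
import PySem

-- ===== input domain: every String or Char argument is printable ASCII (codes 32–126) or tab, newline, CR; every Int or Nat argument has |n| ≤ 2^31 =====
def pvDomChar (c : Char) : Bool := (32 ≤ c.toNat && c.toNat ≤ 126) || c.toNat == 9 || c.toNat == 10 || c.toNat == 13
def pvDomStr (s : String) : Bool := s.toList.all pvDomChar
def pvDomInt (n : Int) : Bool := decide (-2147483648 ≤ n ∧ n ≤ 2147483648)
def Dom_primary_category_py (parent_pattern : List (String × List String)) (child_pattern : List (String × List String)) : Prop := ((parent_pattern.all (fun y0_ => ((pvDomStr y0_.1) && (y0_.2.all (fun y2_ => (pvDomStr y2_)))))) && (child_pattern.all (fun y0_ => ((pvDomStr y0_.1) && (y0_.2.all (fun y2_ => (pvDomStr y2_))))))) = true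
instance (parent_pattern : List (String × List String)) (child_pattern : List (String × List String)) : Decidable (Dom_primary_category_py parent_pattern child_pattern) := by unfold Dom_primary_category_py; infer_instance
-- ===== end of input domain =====

-- B replaces A's two short-circuit scans over the five preferences by one rank list
-- (0 = in both domain sets, 1 = in one, 2 = in neither), takes the minimum rank and
-- indexes back; objective: alternative decomposition (same cost on this fixed-size task).

-- ===== PORT A =====
-- the for-loops over the literal 5-tuple are unrolled, as is the f-string on each literal
def primary_category_py (parent_pattern : List (String × List String)) (child_pattern : List (String × List String)) : String :=
  match (PySem.Dict.mk parent_pattern).get? "domains", (PySem.Dict.mk child_pattern).get? "domains" with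
  | some pdom, some cdom =>
      let shared := PySem.Set.inter (PySem.Set.ofList pdom) (PySem.Set.ofList cdom)
      if PySem.Set.contains shared "emotional" then "emotional_dynamics"
      else if PySem.Set.contains shared "discipline" then "discipline_dynamics"
      else if PySem.Set.contains shared "communication" then "communication_dynamics"
      else if PySem.Set.contains shared "attachment" then "attachment_dynamics"
      else if PySem.Set.contains shared "karmic" then "karmic_dynamics"
      else
        let uni := PySem.Set.union (PySem.Set.ofList pdom) (PySem.Set.ofList cdom)
        if PySem.Set.contains uni "emotional" then "emotional_dynamics"
        else if PySem.Set.contains uni "discipline" then "discipline_dynamics"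
        else if PySem.Set.contains uni "communication" then "communication_dynamics"
        else if PySem.Set.contains uni "attachment" then "attachment_dynamics"
        else if PySem.Set.contains uni "karmic" then "karmic_dynamics"
        else "communication_dynamics"
  | _, _ => ""  -- KeyError in Python; excluded by Pre_

-- ===== PORT B =====
def primary_category_py_alt (parent_pattern : List (String × List String)) (child_pattern : List (String × List String)) : String :=
  match (PySem.Dict.mk parent_pattern).get? "domains" with
  | none => ""  -- KeyError in Python; excluded by Pre_
  | some pdom =>
    match (PySem.Dict.mk child_pattern).get? "domains" with
    | none => ""  -- KeyError in Python; excluded by Pre_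
    | some cdom =>
      let p := PySem.Set.ofList pdom
      let c := PySem.Set.ofList cdom
      let prefs : List String := ["emotional", "discipline", "communication", "attachment", "karmic"]
      let ranks : List Int := prefs.map (fun x =>
        if PySem.Set.contains p x && PySem.Set.contains c x then 0
        else if PySem.Set.contains p x || PySem.Set.contains c x then 1 else 2)
      match PySem.List.min? ranks (fun r => r) with
      | none => ""  -- min([]) raises; unreachable (prefs is nonempty)
      | some m =>
          if m = 2 then "communication_dynamics"
          else
            match PySem.List.index? ranks m with
            | none => ""  -- unreachable: m is an element of ranks
            | some i =>
                match PySem.List.pyGet? prefs (i : Int) with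
                | none => ""  -- unreachable
                | some best => best ++ "_dynamics"

-- ===== PRECONDITION & SPEC =====
-- Pre_ excludes exactly the inputs whose dict lacks a "domains" key, where Python A raises KeyError.
def Pre_primary_category_py (parent_pattern : List (String × List String)) (child_pattern : List (String × List String)) : Prop :=
  ((PySem.Dict.mk parent_pattern).get? "domains").isSome = true ∧ ((PySem.Dict.mk child_pattern).get? "domains").isSome = true
instance (parent_pattern : List (String × List String)) (child_pattern : List (String × List String)) : Decidable (Pre_primary_category_py parent_pattern child_pattern) := by unfold Pre_primary_category_py; infer_instance

def pvWitness_primary_category_py : (List (String × List String)) × (List (String × List String)) :=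
  ([("domains", ["emotional", "x"])], [("domains", ["karmic"])])

def Spec_primary_category_py (parent_pattern : List (String × List String)) (child_pattern : List (String × List String)) (out : String) : Prop := out = primary_category_py_alt parent_pattern child_pattern
instance (parent_pattern : List (String × List String)) (child_pattern : List (String × List String)) (out : String) : Decidable (Spec_primary_category_py parent_pattern child_pattern out) := by unfold Spec_primary_category_py; infer_instance

-- ===== CLAIM (what is proved, stated in full; the proofs are below) =====
def Claim_equal_primary_category_py : Prop := ∀ (parent_pattern : List (String × List String)) (child_pattern : List (String × List String)), Dom_primary_category_py parent_pattern child_pattern → Pre_primary_category_py parent_pattern child_pattern → Spec_primary_category_py parent_pattern child_pattern (primary_category_py parent_pattern child_pattern)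

-- ===== LEMMAS AND PROOFS =====

-- the whole equivalence, with the ten membership tests abstracted to Booleans
theorem pv_core (pdom cdom : List String) :
    (let shared := PySem.Set.inter (PySem.Set.ofList pdom) (PySem.Set.ofList cdom)
     if PySem.Set.contains shared "emotional" then "emotional_dynamics"
     else if PySem.Set.contains shared "discipline" then "discipline_dynamics"
     else if PySem.Set.contains shared "communication" then "communication_dynamics"
     else if PySem.Set.contains shared "attachment" then "attachment_dynamics"
     else if PySem.Set.contains shared "karmic" then "karmic_dynamics"
     else
       let uni := PySem.Set.union (PySem.Set.ofList pdom) (PySem.Set.ofList cdom)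
       if PySem.Set.contains uni "emotional" then "emotional_dynamics"
       else if PySem.Set.contains uni "discipline" then "discipline_dynamics"
       else if PySem.Set.contains uni "communication" then "communication_dynamics"
       else if PySem.Set.contains uni "attachment" then "attachment_dynamics"
       else if PySem.Set.contains uni "karmic" then "karmic_dynamics"
       else "communication_dynamics")
    =
    (let p := PySem.Set.ofList pdom
     let c := PySem.Set.ofList cdom
     let prefs : List String := ["emotional", "discipline", "communication", "attachment", "karmic"]
     let ranks : List Int := prefs.map (fun x =>
       if PySem.Set.contains p x && PySem.Set.contains c x then 0
       else if PySem.Set.contains p x || PySem.Set.contains c x then 1 else 2)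
     match PySem.List.min? ranks (fun r => r) with
     | none => ""
     | some m =>
         if m = 2 then "communication_dynamics"
         else
           match PySem.List.index? ranks m with
           | none => ""
           | some i =>
               match PySem.List.pyGet? prefs (i : Int) with
               | none => ""
               | some best => best ++ "_dynamics") := by
  simp only [PySem.Set.contains_eq_listContains, List.contains_eq_mem, PySem.Set.mem_inter,
    PySem.Set.mem_union, PySem.Set.mem_ofList, Bool.decide_and, Bool.decide_or, List.map_cons, List.map_nil]
  generalize decide ("emotional" ∈ pdom) = pe
  generalize decide ("discipline" ∈ pdom) = pd
  generalize decide ("communication" ∈ pdom) = pc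
  generalize decide ("attachment" ∈ pdom) = pa
  generalize decide ("karmic" ∈ pdom) = pk
  generalize decide ("emotional" ∈ cdom) = ce
  generalize decide ("discipline" ∈ cdom) = cd
  generalize decide ("communication" ∈ cdom) = cc
  generalize decide ("attachment" ∈ cdom) = ca
  generalize decide ("karmic" ∈ cdom) = ck
  revert pe pd pc pa pk ce cd cc ca ck
  decide

-- ===== VERDICT (by name: the statement is the Claim_ definition above) =====
theorem primary_category_py_spec : Claim_equal_primary_category_py := by
  intro pp cp _hdom hpre
  obtain ⟨h1, h2⟩ := hpre
  unfold Spec_primary_category_py primary_category_py primary_category_py_alt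
  cases hp : (PySem.Dict.mk pp).get? "domains" with
  | none => rw [hp] at h1
  | some pdom =>
    cases hc : (PySem.Dict.mk cp).get? "domains" with
    | none => rw [hc] at h2
    | some cdom => exact pv_core pdom cdom
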